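-- pv_equiv track=rewrite | github.com/arnaumarin/LFPDeepStates | utils_models.py | get_nametimelist
-- ===== SOURCE A (Python) =====
-- def get_nametimelist(matching_files):
--     names_dict = {}
--     times_dict = {}
--
--     for file_path in matching_files:
--         file_name = file_path.split("/")[-1]
--         NAME = file_path.split('_')[0]
--         TIME = file_path.split('_')[1]  # Remove the file extension
--         if NAME not in names_dict:
--             names_dict[NAME] = []
--         if NAME not in times_dict:
--             times_dict[NAME] = []
--         names_dict[NAME].append(TIME)
--         times_dict[NAME].append(TIME)
--
--     name_time_list = []
--     for name, times in times_dict.items():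
--         for time in times:
--             name_time_list.append((name, time))
--
--     return name_time_list
-- ===== SOURCE B (Python) =====
-- def get_nametimelist(matching_files):
--     names = list(dict.fromkeys(fp.split('_')[0] for fp in matching_files))
--     return [(name, fp.split('_')[1])
--             for name in names
--             for fp in matching_files
--             if fp.split('_')[0] == name]
-- ===== Notes on version B (the rewrite author's own statement) =====
-- stated objective: alternative
-- what changed: Replaces A's single pass that maintains two grouping dicts of appended time lists (then flattens dict items) with a distinct-names-first pass (dict.fromkeys) followed by a per-name rescan of the input emitting (name, time) pairs directly.
import Mathlib
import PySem

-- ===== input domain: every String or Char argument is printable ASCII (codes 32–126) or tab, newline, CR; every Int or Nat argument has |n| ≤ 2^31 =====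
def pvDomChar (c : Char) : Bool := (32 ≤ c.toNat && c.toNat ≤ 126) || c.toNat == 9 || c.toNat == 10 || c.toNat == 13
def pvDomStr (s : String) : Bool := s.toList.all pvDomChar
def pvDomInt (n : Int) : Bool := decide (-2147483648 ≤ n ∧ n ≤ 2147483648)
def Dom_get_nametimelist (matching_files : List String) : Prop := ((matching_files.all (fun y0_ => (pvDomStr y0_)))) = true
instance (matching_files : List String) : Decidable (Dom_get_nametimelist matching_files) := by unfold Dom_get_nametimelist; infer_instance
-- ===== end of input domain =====

-- B replaces A's one-pass two-dict grouping with a distinct-names pass (dict.fromkeys)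
-- followed by a per-name rescan of the input (objective: alternative decomposition, not faster).

-- fp.split('_')  (sep is the non-empty literal "_", so split? is always some)
def pvSplitU (fp : String) : List String := (PySem.Str.split? fp "_").getD []
-- fp.split('_')[0]  (index 0 always exists: split returns a non-empty list)
def pvName (fp : String) : String := PySem.List.pyGetD (pvSplitU fp) 0 ""
-- fp.split('_')[1]  (exists exactly when '_' occurs in fp; Pre_ guarantees it)
def pvTime (fp : String) : String := PySem.List.pyGetD (pvSplitU fp) 1 ""

-- ===== PORT A =====
def get_nametimelist (matching_files : List String) : List (String × String) :=
  let dicts := matching_files.foldl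
    (fun (st : PySem.Dict String (List String) × PySem.Dict String (List String)) file_path =>
      let names_dict := st.1
      let times_dict := st.2
      let _file_name := PySem.List.pyGetD ((PySem.Str.split? file_path "/").getD []) (-1) ""
      let NAME := pvName file_path
      let TIME := pvTime file_path
      let names_dict := if names_dict.contains NAME then names_dict else names_dict.insert NAME []
      let times_dict := if times_dict.contains NAME then times_dict else times_dict.insert NAME []
      let names_dict := names_dict.modify NAME [] (fun l => l ++ [TIME])
      let times_dict := times_dict.modify NAME [] (fun l => l ++ [TIME])
      (names_dict, times_dict))
    (PySem.Dict.empty, PySem.Dict.empty)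
  dicts.2.items.foldl (fun acc p => p.2.foldl (fun acc t => acc ++ [(p.1, t)]) acc) []

-- ===== PORT B =====
def get_nametimelist_alt (matching_files : List String) : List (String × String) :=
  let names := PySem.List.dedup (matching_files.map (fun fp => pvName fp))
  names.flatMap (fun name =>
    matching_files.filterMap (fun fp =>
      if pvName fp = name then some (name, pvTime fp) else none))

-- ===== PRECONDITION & SPEC =====
-- Pre_ excludes exactly the inputs where the Python A raises IndexError: a file name
-- with no '_' makes file_path.split('_')[1] fail (B raises there too).
def Pre_get_nametimelist (matching_files : List String) : Prop :=
  ∀ fp ∈ matching_files, '_' ∈ fp.toList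
instance (matching_files : List String) : Decidable (Pre_get_nametimelist matching_files) := by
  unfold Pre_get_nametimelist; infer_instance

def pvWitness_get_nametimelist : List String := ["a_1", "b_2", "a_3"]

def Spec_get_nametimelist (matching_files : List String) (out : List (String × String)) : Prop := out = get_nametimelist_alt matching_files
instance (matching_files : List String) (out : List (String × String)) : Decidable (Spec_get_nametimelist matching_files out) := by unfold Spec_get_nametimelist; infer_instance

-- ===== CLAIM (what is proved, stated in full; the proofs are below) =====
def Claim_equal_get_nametimelist : Prop := ∀ (matching_files : List String), Dom_get_nametimelist matching_files → Pre_get_nametimelist matching_files → Spec_get_nametimelist matching_files (get_nametimelist matching_files)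

-- ===== LEMMAS AND PROOFS =====

-- the times_dict update of A's loop, in isolation
def pvStepT (d : PySem.Dict String (List String)) (fp : String) : PySem.Dict String (List String) :=
  (if d.contains (pvName fp) then d else d.insert (pvName fp) []).modify (pvName fp) []
    (fun l => l ++ [pvTime fp])

-- the times grouped under one name, in input order
def pvGrp (mf : List String) (k : String) : List String :=
  mf.filterMap (fun fp => if pvName fp = k then some (pvTime fp) else none)

lemma pvFold_snd (mf : List String)
    (a b : PySem.Dict String (List String)) :
    (mf.foldl
      (fun (st : PySem.Dict String (List String) × PySem.Dict String (List String)) file_path =>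
        let names_dict := st.1
        let times_dict := st.2
        let _file_name := PySem.List.pyGetD ((PySem.Str.split? file_path "/").getD []) (-1) ""
        let NAME := pvName file_path
        let TIME := pvTime file_path
        let names_dict := if names_dict.contains NAME then names_dict else names_dict.insert NAME []
        let times_dict := if times_dict.contains NAME then times_dict else times_dict.insert NAME []
        let names_dict := names_dict.modify NAME [] (fun l => l ++ [TIME])
        let times_dict := times_dict.modify NAME [] (fun l => l ++ [TIME])
        (names_dict, times_dict)) (a, b)).2
    = mf.foldl pvStepT b := by
  induction mf generalizing a b with
  | nil => rfl
  | cons x xs ih => simpa [pvStepT] using ih _ _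

lemma pvGrp_append (l : List String) (x : String) (k : String) :
    pvGrp (l ++ [x]) k = pvGrp l k ++ (if pvName x = k then [pvTime x] else []) := by
  by_cases h : pvName x = k <;> simp [pvGrp, List.filterMap_append, h]

lemma pvFind_keymap (ks : List String) (f : String → List String) (k0 : String) (h : k0 ∈ ks) :
    List.find? (fun p => p.1 == k0) (ks.map (fun k => (k, f k))) = some (k0, f k0) := by
  induction ks with
  | nil => simp at h
  | cons k ks ih =>
    rcases List.mem_cons.1 h with h | h
    · subst h; simp
    · by_cases hk : k = k0
      · subst hk; simp
      · simpa [hk] using ih h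

lemma pvOfList_append_singleton {α : Type} [BEq α] (xs : List α) (y : α) :
    PySem.Set.ofList (xs ++ [y]) = PySem.Set.add (PySem.Set.ofList xs) y := by
  simp [PySem.Set.ofList, List.foldl_append]

lemma pvFold_items (mf : List String) :
    (mf.foldl pvStepT PySem.Dict.empty).items
    = (PySem.Set.ofList (mf.map pvName)).map (fun k => (k, pvGrp mf k)) := by
  induction mf using List.reverseRecOn with
  | nil => rfl
  | append_singleton l x ih =>
    rw [List.foldl_append]
    simp only [List.foldl_cons, List.foldl_nil, List.map_append, List.map_cons, List.map_nil,
      pvOfList_append_singleton]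
    set d := l.foldl pvStepT PySem.Dict.empty with hd
    set k0 := pvName x with hk0
    by_cases hmem : k0 ∈ l.map pvName
    · -- existing key: dict keys unchanged, value at k0 extended
      have hcon : d.contains k0 = true := by
        simp only [PySem.Dict.contains, ih, List.any_eq_true]
        exact ⟨(k0, pvGrp l k0), List.mem_map_of_mem ((PySem.Set.mem_ofList _ _).2 hmem), by simp⟩
      have hget : d.getD k0 [] = pvGrp l k0 := by
        simp only [PySem.Dict.getD, PySem.Dict.get?, ih,
          pvFind_keymap _ _ _ ((PySem.Set.mem_ofList _ _).2 hmem)]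
        rfl
      have hadd : PySem.Set.add (PySem.Set.ofList (l.map pvName)) k0
          = PySem.Set.ofList (l.map pvName) := by
        simp [PySem.Set.add]
        exact List.mem_map.1 hmem
      rw [hadd]
      simp only [pvStepT, ← hk0, if_pos, PySem.Dict.modify, hget,
        PySem.Dict.insert, hcon, if_pos, ih, List.map_map]
      apply List.map_congr_left
      intro k hk
      by_cases hkk : k = k0
      · subst hkk; simp [pvGrp_append, hk0.symm]
      · have hne : ¬ pvName x = k := fun hh => hkk hh.symm
        simp [Function.comp, hkk, pvGrp_append, hne]
    · -- new key: appended at the end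
      have hnok : ∀ p ∈ d.items, (p.1 == k0) = false := by
        intro p hp
        rw [ih] at hp
        rcases List.mem_map.1 hp with ⟨k, hk, rfl⟩
        have : k ≠ k0 := fun h => hmem (h ▸ (PySem.Set.mem_ofList _ _).1 hk)
        simpa using this
      have hcon : d.contains k0 = false := by
        simp only [PySem.Dict.contains, List.any_eq_false]
        intro p hp; simp [hnok p hp]
      have hadd : PySem.Set.add (PySem.Set.ofList (l.map pvName)) k0
          = PySem.Set.ofList (l.map pvName) ++ [k0] := by
        have hno : ¬ k0 ∈ PySem.Set.ofList (l.map pvName) := fun h =>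
          hmem ((PySem.Set.mem_ofList _ _).1 h)
        simp only [PySem.Set.add]
        rw [if_neg (by simp [hno])]
      rw [hadd]
      have hfind : List.find? (fun p => p.1 == k0) d.items = none :=
        List.find?_eq_none.2 (fun p hp => by simp [hnok p hp])
      have hins : (d.insert k0 []).items = d.items ++ [(k0, ([] : List String))] := by
        simp only [PySem.Dict.insert, PySem.Dict.contains]
        rw [if_neg]
        simp only [PySem.Dict.contains] at hcon
        rw [hcon]; simp
      have hfind2 : List.find? (fun p => p.1 == k0) (d.insert k0 []).items = some (k0, []) := by
        rw [hins, List.find?_append, hfind]; simp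
      have hcon2 : ((d.insert k0 []).items.any fun p => p.1 == k0) = true := by
        rw [hins]; simp [List.any_append]
      have hgrp0 : pvGrp l k0 = [] := by
        rw [pvGrp, List.filterMap_eq_nil_iff]
        intro fp hfp
        have : ¬ pvName fp = k0 := fun h => hmem (h ▸ List.mem_map_of_mem hfp)
        simp [this]
      have hget2 : ((d.insert k0 []).get? k0) = some [] := by
        simp only [PySem.Dict.get?, hfind2, Option.map_some]
      have hstep : (pvStepT d x).items = d.items ++ [(k0, [pvTime x])] := by
        have h1 : pvStepT d x = (d.insert k0 []).insert k0
            ((((d.insert k0 []).get? k0).getD []) ++ [pvTime x]) := by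
          simp only [pvStepT, ← hk0, hcon, Bool.false_eq_true, if_false,
            PySem.Dict.modify, PySem.Dict.getD]
        rw [h1, hget2]
        simp only [Option.getD_some, List.nil_append]
        simp only [PySem.Dict.insert, PySem.Dict.contains] at hcon2 ⊢
        rw [if_pos hcon2]
        simp only [PySem.Dict.insert, PySem.Dict.contains] at hins
        rw [hins, List.map_append]
        have hmap : List.map (fun p => if p.1 = k0 then (k0, [pvTime x]) else p)
            d.items = d.items := by
          conv_rhs => rw [← List.map_id d.items]
          refine List.map_congr_left (fun p hp => ?_)
          have hne := hnok p hp
          simp only [beq_eq_false_iff_ne, ne_eq] at hne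
          simp [hne]
        simp [hmap]
      rw [hstep, ih, List.map_append]
      congr 1
      · refine List.map_congr_left (fun k hk => ?_)
        have hne : ¬ pvName x = k := fun hh =>
          hmem (by rw [hk0, hh]; exact (PySem.Set.mem_ofList _ _).1 hk)
        simp [pvGrp_append, hne]
      · simp [pvGrp_append, hk0.symm, hgrp0]

lemma pvFilterMap_eq_map_grp (mf : List String) (k : String) :
    mf.filterMap (fun fp => if pvName fp = k then some (k, pvTime fp) else none)
    = (pvGrp mf k).map (fun t => (k, t)) := by
  induction mf with
  | nil => rfl
  | cons x xs ih =>
    by_cases h : pvName x = k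
    · subst h; simp [pvGrp, ih]
    · simp [pvGrp, h] at ih ⊢; exact ih

-- ===== VERDICT (by name: the statement is the Claim_ definition above) =====
theorem get_nametimelist_spec : Claim_equal_get_nametimelist := by
  intro mf _ _
  unfold Spec_get_nametimelist get_nametimelist get_nametimelist_alt
  simp only []
  rw [pvFold_snd, pvFold_items]
  have hinner : (fun (acc : List (String × String)) (p : String × List String) =>
      p.2.foldl (fun acc t => acc ++ [(p.1, t)]) acc)
      = fun acc p => acc ++ p.2.map (fun t => (p.1, t)) := by
    funext acc p
    exact PySem.List.foldl_append_singleton_eq_map _ _ _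
  rw [hinner, PySem.List.foldl_append_eq_flatMap]
  rw [List.flatMap_map]
  simp only [PySem.List.dedup_eq_ofList, List.nil_append]
  congr 1
  funext k
  exact (pvFilterMap_eq_map_grp mf k).symm
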